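-- pv_equiv track=rewrite | github.com/haeyeon0106/python_coding | 프로그래머스/Lv.2_kakao_기출/[1차]뉴스클러스터링.py | jarkard
-- ===== SOURCE A (Python) =====
-- def jarkard(str3):
--     result = []
--     string = ''
--     for i in str3:
--         if i.isalpha():
--             string += i
--         elif i == ' ' or not i.isalpha():
--             string = ''
--         if len(string) == 2:
--             result.append(string)
--             string = string[-1]
--     return result
-- ===== SOURCE B (Python) =====
-- def jarkard(str3):
--     return [a + b for a, b in zip(str3, str3[1:])
--             if a.isalpha() and b.isalpha()]
-- ===== Notes on version B (the rewrite author's own statement) =====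
-- stated objective: simpler
-- what changed: Replaces A's running-accumulator state machine (build-up string, reset, keep last char) with a stateless one-liner over adjacent character pairs via zip(str3, str3[1:]).
import Mathlib
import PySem

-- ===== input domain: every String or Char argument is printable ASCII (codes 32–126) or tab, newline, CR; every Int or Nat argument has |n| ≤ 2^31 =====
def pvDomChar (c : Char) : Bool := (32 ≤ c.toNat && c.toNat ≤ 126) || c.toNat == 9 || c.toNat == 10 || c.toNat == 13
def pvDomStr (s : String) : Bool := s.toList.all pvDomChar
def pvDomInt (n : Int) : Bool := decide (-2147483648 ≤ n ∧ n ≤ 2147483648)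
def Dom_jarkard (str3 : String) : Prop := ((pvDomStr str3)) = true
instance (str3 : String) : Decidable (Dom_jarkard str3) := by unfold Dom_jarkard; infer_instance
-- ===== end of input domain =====

-- B replaces A's running-accumulator state machine with a stateless pass over adjacent character pairs (simpler decomposition, same O(n) cost).


-- ===== PORT A =====
-- loop body of A: state is (result, string); Python's string[-1] is ported via PySem.List.pyGet? (-1)
def jarkardStep (s : List String × List Char) (i : Char) : List String × List Char :=
  let string : List Char :=
    if PySem.Chars.isalpha i then s.2 ++ [i]
    else if i == ' ' || !(PySem.Chars.isalpha i) then [] else s.2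
  if string.length == 2 then
    (s.1 ++ [String.ofList string],
     match PySem.List.pyGet? string (-1) with | some c => [c] | none => [])
  else (s.1, string)

def jarkard (str3 : String) : List String :=
  (str3.toList.foldl jarkardStep ([], [])).1

-- ===== PORT B =====
-- Source B: [a + b for a, b in zip(str3, str3[1:]) if a.isalpha() and b.isalpha()]
def jarkard_alt (str3 : String) : List String :=
  (str3.toList.zip (PySem.List.slice str3.toList (some 1) none)).filterMap
    (fun p => if PySem.Chars.isalpha p.1 && PySem.Chars.isalpha p.2
              then some (String.ofList [p.1, p.2]) else none)

-- ===== PRECONDITION & SPEC =====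
def Spec_jarkard (str3 : String) (out : List String) : Prop := out = jarkard_alt str3
instance (str3 : String) (out : List String) : Decidable (Spec_jarkard str3 out) := by unfold Spec_jarkard; infer_instance

-- ===== CLAIM (what is proved, stated in full; the proofs are below) =====
def Claim_equal_jarkard : Prop := ∀ (str3 : String), Dom_jarkard str3 → Spec_jarkard str3 (jarkard str3)

-- ===== LEMMAS AND PROOFS =====

-- the alphabetic bigrams of a char list, by structural recursion (proof-side characterisation)
def pvBg : List Char → List String
  | a :: b :: rest =>
      (if PySem.Chars.isalpha a && PySem.Chars.isalpha b then [String.ofList [a, b]] else [])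
        ++ pvBg (b :: rest)
  | _ => []

lemma pvBg_eq_zip (l : List Char) :
    (l.zip (l.drop 1)).filterMap
      (fun p => if PySem.Chars.isalpha p.1 && PySem.Chars.isalpha p.2
                then some (String.ofList [p.1, p.2]) else none) = pvBg l := by
  match l with
  | [] => rfl
  | [a] => rfl
  | a :: b :: rest =>
    have ih := pvBg_eq_zip (b :: rest)
    simp only [List.drop, List.zip, List.zipWith, List.filterMap, pvBg] at *
    split_ifs with h <;> simp [h] at * <;> exact ih

lemma jarkard_main (rest : List Char) :
    ∀ (prev : Char) (res : List String),
      (List.foldl jarkardStep (res, if PySem.Chars.isalpha prev then [prev] else []) rest).1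
        = res ++ pvBg (prev :: rest) := by
  induction rest with
  | nil => intro prev res; simp [pvBg]
  | cons r0 rest ih =>
    intro prev res
    rw [List.foldl_cons]
    have hstate : jarkardStep (res, if PySem.Chars.isalpha prev then [prev] else []) r0 =
        (res ++ (if PySem.Chars.isalpha prev && PySem.Chars.isalpha r0
                 then [String.ofList [prev, r0]] else []),
         if PySem.Chars.isalpha r0 then [r0] else []) := by
      by_cases hp : PySem.Chars.isalpha prev = true <;>
        by_cases hr : PySem.Chars.isalpha r0 = true <;>
        simp [jarkardStep, hp, hr, PySem.List.pyGet?, PySem.List.pyIdx?]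
    rw [hstate, ih]
    simp [pvBg]

-- ===== VERDICT (by name: the statement is the Claim_ definition above) =====
theorem jarkard_spec : Claim_equal_jarkard := by
  intro str3 _
  unfold Spec_jarkard jarkard jarkard_alt
  rw [show PySem.List.slice str3.toList (some 1) none = str3.toList.drop 1 from by
        simp [PySem.List.slice_from]]
  rw [pvBg_eq_zip]
  cases h : str3.toList with
  | nil => rfl
  | cons c rest =>
    rw [List.foldl_cons]
    have hstep : jarkardStep ([], []) c
        = ([], if PySem.Chars.isalpha c then [c] else []) := by
      by_cases hc : PySem.Chars.isalpha c = true <;> simp [jarkardStep, hc]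
    rw [hstep, jarkard_main rest c []]
    simp
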